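-- pv_equiv track=rewrite | github.com/apple/ml-4m | fourm/utils/plotting_utils.py | _split_metadata_string
-- ===== SOURCE A (Python) =====
-- def _split_metadata_string(input_string):
--     result = []
--     current_subseq = []
--
--     for part in input_string.split():
--         # If we encounter a "v1" and there's already a subsequence being built,
--         # we add it to the result and start a new one
--         if 'v1' in part and current_subseq:
--             result.append(current_subseq)
--             current_subseq = []
--
--         current_subseq.append(part)
--
--     # Append any remaining subsequence to the result
--     if current_subseq:
--         result.append(current_subseq)
--
--     return result
-- ===== SOURCE B (Python) =====
-- def _split_metadata_string(input_string):
--     # Span decomposition: repeatedly peel off one whole group -- the token at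
--     # the current position plus the longest following run of non-'v1' tokens --
--     # and continue after it. No pending-group accumulator, no flush logic.
--     tokens = input_string.split()
--     result = []
--     i = 0
--     n = len(tokens)
--     while i < n:
--         # span: advance j over the run of non-'v1' tokens after position i
--         j = i + 1
--         while j < n and 'v1' not in tokens[j]:
--             j += 1
--         result.append(tokens[i:j])
--         i = j
--     return result
-- ===== Notes on version B (the rewrite author's own statement) =====
-- stated objective: alternative
-- what changed: B replaces A's streaming loop with its accumulator-and-flush-on-'v1' logic by a span decomposition: an outer loop repeatedly peels off one whole group at a time (the current token plus the longest following run of non-'v1' tokens, found by an inner scan), so there is no pending-group state and no flush step at all.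
import Mathlib
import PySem

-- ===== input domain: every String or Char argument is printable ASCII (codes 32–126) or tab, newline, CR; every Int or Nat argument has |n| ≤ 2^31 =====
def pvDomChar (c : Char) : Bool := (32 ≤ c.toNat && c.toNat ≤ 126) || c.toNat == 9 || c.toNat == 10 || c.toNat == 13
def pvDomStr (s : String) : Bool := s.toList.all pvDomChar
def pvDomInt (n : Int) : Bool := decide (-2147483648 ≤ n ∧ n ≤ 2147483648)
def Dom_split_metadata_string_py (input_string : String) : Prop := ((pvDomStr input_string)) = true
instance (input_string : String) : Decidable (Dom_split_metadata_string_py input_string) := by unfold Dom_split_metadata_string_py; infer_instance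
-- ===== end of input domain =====

-- B replaces A's streaming accumulator-and-flush loop by a recursive span
-- decomposition (peel one whole group, recurse on the rest); objective:
-- alternative decomposition, same cost.

-- ===== PORT A =====
-- one iteration of A's loop: flush the non-empty pending subsequence at a 'v1', then append part
def pvStepA (st : List (List String) × List String) (part : String) :
    List (List String) × List String :=
  if PySem.Str.isIn "v1" part && !st.2.isEmpty then (st.1 ++ [st.2], [part])
  else (st.1, st.2 ++ [part])

-- A's trailing 'if current_subseq: result.append(current_subseq)'
def pvFinishA (r : List (List String) × List String) : List (List String) :=
  if !r.2.isEmpty then r.1 ++ [r.2] else r.1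

def split_metadata_string_py (input_string : String) : List (List String) :=
  pvFinishA ((PySem.Str.split₀ input_string).foldl pvStepA ([], []))

-- ===== PORT B =====
-- B's inner while loop (span): the run of non-'v1' tokens at the front of the
-- remaining suffix, and what follows it (index j ↔ the suffix it points into)
def pvSpanNoV1 : List String → List String × List String
  | [] => ([], [])
  | t :: ts =>
    if PySem.Str.isIn "v1" t then ([], t :: ts)
    else (t :: (pvSpanNoV1 ts).1, (pvSpanNoV1 ts).2)

theorem pvSpanNoV1_len (ts : List String) : (pvSpanNoV1 ts).2.length ≤ ts.length := by
  induction ts with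
  | nil => simp [pvSpanNoV1]
  | cons t ts ih =>
    simp only [pvSpanNoV1]
    split_ifs
    · simp
    · simpa using Nat.le_succ_of_le ih

-- B's outer while loop: peel off one group (tokens[i:j] = current token + span)
-- and continue on the remainder
def pvGo : List String → List (List String)
  | [] => []
  | p :: ps => (p :: (pvSpanNoV1 ps).1) :: pvGo (pvSpanNoV1 ps).2
termination_by ts => ts.length
decreasing_by
  simpa using Nat.lt_succ_of_le (pvSpanNoV1_len ps)

def split_metadata_string_py_alt (input_string : String) : List (List String) :=
  pvGo (PySem.Str.split₀ input_string)

-- ===== PRECONDITION & SPEC =====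
def Spec_split_metadata_string_py (input_string : String) (out : List (List String)) : Prop := out = split_metadata_string_py_alt input_string
instance (input_string : String) (out : List (List String)) : Decidable (Spec_split_metadata_string_py input_string out) := by unfold Spec_split_metadata_string_py; infer_instance

-- ===== CLAIM (what is proved, stated in full; the proofs are below) =====
def Claim_equal_split_metadata_string_py : Prop := ∀ (input_string : String), Dom_split_metadata_string_py input_string → Spec_split_metadata_string_py input_string (split_metadata_string_py input_string)

-- ===== LEMMAS AND PROOFS =====

-- reference form: splitFrom cur L = remaining groups given non-empty pending group cur
def splitFrom (cur : List String) : List String → List (List String)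
  | [] => [cur]
  | p :: ps =>
    if PySem.Chars.isIn ['v', '1'] p.toList then cur :: splitFrom [p] ps
    else splitFrom (cur ++ [p]) ps

theorem A_gen (L : List String) (res : List (List String)) (cur : List String)
    (h : cur ≠ []) :
    pvFinishA (L.foldl pvStepA (res, cur)) = res ++ splitFrom cur L := by
  induction L generalizing res cur with
  | nil => simp [pvFinishA, splitFrom, h]
  | cons p ps ih =>
    simp only [List.foldl_cons, pvStepA]
    by_cases hp : PySem.Chars.isIn ['v', '1'] p.toList = true
    · rw [if_pos (by simp [PySem.Str.isIn, hp, h])]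
      rw [show splitFrom cur (p :: ps) = cur :: splitFrom [p] ps from by simp [splitFrom, hp]]
      simpa [List.append_assoc] using ih (res ++ [cur]) [p] (by simp)
    · rw [if_neg (by simp [PySem.Str.isIn, hp])]
      rw [show splitFrom cur (p :: ps) = splitFrom (cur ++ [p]) ps from by
        simp [splitFrom, hp]]
      exact ih res (cur ++ [p]) (by simp)

-- splitFrom is exactly span-then-recurse
theorem str_isIn_v1 (p : String) :
    PySem.Str.isIn "v1" p = PySem.Chars.isIn ['v', '1'] p.toList := rfl

theorem splitFrom_span (L : List String) (cur : List String) :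
    splitFrom cur L = (cur ++ (pvSpanNoV1 L).1) :: pvGo (pvSpanNoV1 L).2 := by
  induction L generalizing cur with
  | nil => simp [splitFrom, pvSpanNoV1, pvGo]
  | cons p ps ih =>
    by_cases hp : PySem.Chars.isIn ['v', '1'] p.toList = true
    · simp only [splitFrom, hp, if_true, pvSpanNoV1, str_isIn_v1, pvGo]
      rw [ih [p]]
      simp
    · simp only [splitFrom, hp, if_false, Bool.false_eq_true, pvSpanNoV1, str_isIn_v1]
      rw [ih (cur ++ [p])]
      simp

-- ===== VERDICT (by name: the statement is the Claim_ definition above) =====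
theorem split_metadata_string_py_spec : Claim_equal_split_metadata_string_py := by
  intro s _
  unfold Spec_split_metadata_string_py split_metadata_string_py split_metadata_string_py_alt
  cases hT : PySem.Str.split₀ s with
  | nil => simp [pvFinishA, pvGo]
  | cons p ps =>
    simp only [List.foldl_cons, pvStepA]
    rw [if_neg (by simp), show ([] : List String) ++ [p] = [p] from rfl]
    rw [A_gen ps [] [p] (by simp), splitFrom_span]
    simp only [pvGo, List.nil_append, List.singleton_append]
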